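-- pv_equiv track=rewrite | github.com/AidanNowa/EC551_Lab1 | program1.py | estimate_transistors
-- ===== SOURCE A (Python) =====
-- def estimate_transistors(expression):
--     # Remove spaces for consistent parsing
--     expression = expression.replace(" ", "")
--
--     # Initialize counts
--     num_inverters = 0
--     num_and_gates = 0
--     num_or_gates = 0
--
--     # Find all instances of ~{variable}
--     if(expression.find('~A') >= 0):
--         num_inverters += 1
--     if(expression.find('~B') >= 0):
--         num_inverters += 1
--     if(expression.find('~C') >= 0):
--         num_inverters += 1
--     if(expression.find('~D') >= 0):
--         num_inverters += 1
--
--     # Split the expression into terms based on the '|' symbol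
--     or_terms = expression.split('|')
--     num_or_gates = len(or_terms)
--
--     for term in or_terms:
--         # Count the number of '&' symbols in each term to determine the number of AND gates
--         num_and_gates += term.count('&') + 1 # Add 1 because each term starts with an implicit AND
--
--     total_transistors = num_inverters + (2 * num_and_gates) + (2 * num_or_gates)
--
--     return num_inverters, num_and_gates, num_or_gates, total_transistors
-- ===== SOURCE B (Python) =====
-- def estimate_transistors(expression):
--     # Single left-to-right pass (state machine): count '|' and '&' on the fly,
--     # and detect inverters by remembering the previous non-space character.
--     bars = 0
--     amps = 0
--     invA = invB = invC = invD = False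
--     prev = ''
--     for c in expression:
--         if c == ' ':
--             continue
--         if c == '|':
--             bars += 1
--         elif c == '&':
--             amps += 1
--         elif prev == '~':
--             if c == 'A':
--                 invA = True
--             elif c == 'B':
--                 invB = True
--             elif c == 'C':
--                 invC = True
--             elif c == 'D':
--                 invD = True
--         prev = c
--     num_inverters = invA + invB + invC + invD
--     num_or_gates = bars + 1
--     num_and_gates = amps + num_or_gates
--     total_transistors = num_inverters + (2 * num_and_gates) + (2 * num_or_gates)
--     return num_inverters, num_and_gates, num_or_gates, total_transistors
-- ===== Notes on version B (the rewrite author's own statement) =====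
-- stated objective: alternative
-- what changed: Replaces A's staged passes (space-stripping replace, four substring searches, split on '|', per-term '&' loop) with one character-by-character state machine that skips spaces, counts '|' and '&' as it goes, and sets per-variable inverter flags when the previous non-space character was '~'.
import Mathlib
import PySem

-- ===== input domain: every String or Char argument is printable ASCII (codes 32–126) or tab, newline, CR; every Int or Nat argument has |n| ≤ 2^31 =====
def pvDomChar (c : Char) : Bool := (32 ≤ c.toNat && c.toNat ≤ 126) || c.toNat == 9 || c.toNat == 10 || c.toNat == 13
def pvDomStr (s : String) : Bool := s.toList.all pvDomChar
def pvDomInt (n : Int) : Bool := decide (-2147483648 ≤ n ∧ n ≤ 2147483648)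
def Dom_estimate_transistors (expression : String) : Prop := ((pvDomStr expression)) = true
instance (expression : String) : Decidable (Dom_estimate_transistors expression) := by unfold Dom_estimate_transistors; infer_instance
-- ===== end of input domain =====

-- B replaces A's staged passes (replace, four finds, split on '|', per-term loop) with one
-- character-by-character state machine over the raw string (alternative decomposition, same O(n) cost).

-- ===== PORT A =====
def estimate_transistors (expression : String) : Int × Int × Int × Int :=
  let e := PySem.Str.replace expression " " ""
  let num_inverters : Int := 0
  let num_inverters := if 0 ≤ PySem.Str.find e "~A" then num_inverters + 1 else num_inverters
  let num_inverters := if 0 ≤ PySem.Str.find e "~B" then num_inverters + 1 else num_inverters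
  let num_inverters := if 0 ≤ PySem.Str.find e "~C" then num_inverters + 1 else num_inverters
  let num_inverters := if 0 ≤ PySem.Str.find e "~D" then num_inverters + 1 else num_inverters
  let or_terms : List String := (PySem.Str.split? e "|").getD []   -- sep '|' ≠ "", so split? is always some
  let num_or_gates : Int := or_terms.length
  let num_and_gates : Int := or_terms.foldl (fun acc term => acc + ((PySem.Str.count term "&" : Int) + 1)) 0
  let total_transistors := num_inverters + 2 * num_and_gates + 2 * num_or_gates
  (num_inverters, num_and_gates, num_or_gates, total_transistors)

-- ===== PORT B =====
-- state of Source B's loop: (bars, amps, invA, invB, invC, invD, prev)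
structure BState where
  bars : Int
  amps : Int
  invA : Bool
  invB : Bool
  invC : Bool
  invD : Bool
  prev : Option Char   -- Python's prev = '' start is the "no previous char" state
deriving Repr, DecidableEq

-- one iteration of Source B's for-loop body
def bstep (s : BState) (c : Char) : BState :=
  if c = ' ' then s   -- continue
  else
    let s' :=
      if c = '|' then { s with bars := s.bars + 1 }
      else if c = '&' then { s with amps := s.amps + 1 }
      else if s.prev = some '~' then
        if c = 'A' then { s with invA := true }
        else if c = 'B' then { s with invB := true }
        else if c = 'C' then { s with invC := true }
        else if c = 'D' then { s with invD := true }
        else s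
      else s
    { s' with prev := some c }

def estimate_transistors_alt (expression : String) : Int × Int × Int × Int :=
  let r := expression.toList.foldl bstep ⟨0, 0, false, false, false, false, none⟩
  let bi : Bool → Int := fun b => if b then 1 else 0   -- Python bool-as-int in the sum
  let num_inverters := bi r.invA + bi r.invB + bi r.invC + bi r.invD
  let num_or_gates := r.bars + 1
  let num_and_gates := r.amps + num_or_gates
  let total_transistors := num_inverters + 2 * num_and_gates + 2 * num_or_gates
  (num_inverters, num_and_gates, num_or_gates, total_transistors)

-- ===== PRECONDITION & SPEC =====
def Spec_estimate_transistors (expression : String) (out : Int × Int × Int × Int) : Prop := out = estimate_transistors_alt expression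
instance (expression : String) (out : Int × Int × Int × Int) : Decidable (Spec_estimate_transistors expression out) := by unfold Spec_estimate_transistors; infer_instance

-- ===== CLAIM (what is proved, stated in full; the proofs are below) =====
def Claim_equal_estimate_transistors : Prop := ∀ (expression : String), Dom_estimate_transistors expression → Spec_estimate_transistors expression (estimate_transistors expression)

-- ===== LEMMAS AND PROOFS =====

-- replace " " "" is filtering out spaces
theorem replaceGo_space (l : List Char) : ∀ (fuel : Nat) (acc : List Char), l.length ≤ fuel →
    PySem.Chars.replace.go [' '] [] fuel l acc = acc.reverse ++ l.filter (fun c => !(c == ' ')) := by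
  induction l with
  | nil => intro fuel acc _; cases fuel <;> simp [PySem.Chars.replace.go]
  | cons h t ih =>
    intro fuel acc hf
    cases fuel with
    | zero => simp at hf
    | succ f =>
      simp only [PySem.Chars.replace.go]
      by_cases hc : h = ' '
      · subst hc
        simp only [List.isPrefixOf, BEq.rfl, Bool.true_and, if_true, List.length_cons,
          List.length_nil, List.drop_succ_cons, List.drop_zero, List.reverse_nil,
          List.nil_append]
        rw [ih f acc (by simpa using hf)]
        simp
      · rw [if_neg (by simp [List.isPrefixOf, Ne.symm hc])]
        rw [ih f (h :: acc) (by simpa using hf)]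
        simp [hc]

theorem replace_space (l : List Char) :
    PySem.Chars.replace l [' '] [] = l.filter (fun c => !(c == ' ')) := by
  rw [PySem.Chars.replace, if_neg (by simp), replaceGo_space l l.length [] le_rfl]
  simp

-- skipping spaces in the fold = folding the filtered list
theorem foldl_bstep_filter : ∀ (l : List Char) (s : BState),
    l.foldl bstep s = (l.filter (fun c => !(c == ' '))).foldl bstep s := by
  intro l
  induction l with
  | nil => intro s; rfl
  | cons h t ih =>
    intro s
    by_cases hc : h = ' '
    · subst hc; simp [bstep, ih]
    · simp [hc, ih]

-- step facts
theorem bstep_bars (s : BState) (c : Char) :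
    (bstep s c).bars = s.bars + (if c = '|' then 1 else 0) := by
  unfold bstep; split_ifs <;> simp_all

theorem bstep_amps (s : BState) (c : Char) :
    (bstep s c).amps = s.amps + (if c = '&' then 1 else 0) := by
  unfold bstep; split_ifs <;> simp_all

theorem bstep_prev (s : BState) (c : Char) (hc : c ≠ ' ') : (bstep s c).prev = some c := by
  unfold bstep; split_ifs <;> simp_all

-- counts accumulate
theorem foldl_bars : ∀ (l : List Char) (s : BState),
    (l.foldl bstep s).bars = s.bars + (l.count '|' : Int) := by
  intro l
  induction l with
  | nil => intro s; simp
  | cons h t ih =>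
    intro s
    rw [List.foldl_cons, ih, bstep_bars, List.count_cons]
    by_cases hc : h = '|' <;> simp [hc] <;> omega

theorem foldl_amps : ∀ (l : List Char) (s : BState),
    (l.foldl bstep s).amps = s.amps + (l.count '&' : Int) := by
  intro l
  induction l with
  | nil => intro s; simp
  | cons h t ih =>
    intro s
    rw [List.foldl_cons, ih, bstep_amps, List.count_cons]
    by_cases hc : h = '&' <;> simp [hc] <;> omega

-- singleton prefix is a head test
theorem singleton_prefix_head (v : Char) (t : List Char) : [v] <+: t ↔ t.head? = some v := by
  cases t with
  | nil => simp
  | cons h tt => simp [List.cons_prefix_cons, eq_comm]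

-- flag invariant: after folding a space-free list, a flag is set iff it was set, or the pending
-- '~' from the previous state is completed by the list's head, or '~v' occurs inside the list
theorem foldl_flag (f : BState → Bool) (v : Char)
    (hstep : ∀ s c, c ≠ ' ' → f (bstep s c) = (f s || (decide (s.prev = some '~') && decide (c = v)))) :
    ∀ (l : List Char) (s : BState), (' ' ∉ l) →
      (f (l.foldl bstep s) = true ↔
        (f s = true ∨ (s.prev = some '~' ∧ l.head? = some v) ∨ ['~', v] <:+: l)) := by
  intro l
  induction l with
  | nil =>
    intro s _
    simp [List.infix_nil]
  | cons c t ih =>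
    intro s hsp
    have hc : c ≠ ' ' := fun h => hsp (by simp [h])
    rw [List.foldl_cons, ih (bstep s c) (fun h => hsp (by simp [h])), hstep s c hc,
      bstep_prev s c hc]
    have hix : ['~', v] <:+: (c :: t) ↔ (c = '~' ∧ t.head? = some v) ∨ ['~', v] <:+: t := by
      rw [List.infix_cons_iff]
      constructor
      · rintro (hp | h)
        · rw [List.cons_prefix_cons] at hp
          exact Or.inl ⟨hp.1.symm, (singleton_prefix_head v t).mp hp.2⟩
        · exact Or.inr h
      · rintro (⟨h1, h2⟩ | h)
        · exact Or.inl (by rw [List.cons_prefix_cons]; exact ⟨h1.symm, (singleton_prefix_head v t).mpr h2⟩)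
        · exact Or.inr h
    rw [hix]
    simp only [Bool.or_eq_true, Bool.and_eq_true, decide_eq_true_eq, Option.some.injEq]
    constructor
    · rintro ((h | ⟨h1, h2⟩) | ⟨h1, h2⟩ | h)
      · exact Or.inl h
      · exact Or.inr (Or.inl ⟨h1, by simp [h2]⟩)
      · exact Or.inr (Or.inr (Or.inl ⟨h1, h2⟩))
      · exact Or.inr (Or.inr (Or.inr h))
    · rintro (h | ⟨h1, h2⟩ | ⟨h1, h2⟩ | h)
      · exact Or.inl (Or.inl h)
      · simp at h2; exact Or.inl (Or.inr ⟨h1, h2⟩)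
      · exact Or.inr (Or.inl ⟨h1, h2⟩)
      · exact Or.inr (Or.inr h)

theorem bstep_invA (s : BState) (c : Char) (hc : c ≠ ' ') :
    (bstep s c).invA = (s.invA || (decide (s.prev = some '~') && decide (c = 'A'))) := by
  unfold bstep; split_ifs <;> simp_all
theorem bstep_invB (s : BState) (c : Char) (hc : c ≠ ' ') :
    (bstep s c).invB = (s.invB || (decide (s.prev = some '~') && decide (c = 'B'))) := by
  unfold bstep; split_ifs <;> simp_all
theorem bstep_invC (s : BState) (c : Char) (hc : c ≠ ' ') :
    (bstep s c).invC = (s.invC || (decide (s.prev = some '~') && decide (c = 'C'))) := by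
  unfold bstep; split_ifs <;> simp_all
theorem bstep_invD (s : BState) (c : Char) (hc : c ≠ ' ') :
    (bstep s c).invD = (s.invD || (decide (s.prev = some '~') && decide (c = 'D'))) := by
  unfold bstep; split_ifs <;> simp_all

-- A-side characterisations (split/count primitives)

-- Chars.count with a single-character needle is List.count.
theorem countGo_single (c : Char) : ∀ (l : List Char) (fuel acc : Nat), l.length ≤ fuel →
    PySem.Chars.count.go [c] fuel l acc = acc + l.count c := by
  intro l
  induction l with
  | nil =>
    intro fuel acc _
    cases fuel <;> simp [PySem.Chars.count.go]
  | cons h t ih =>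
    intro fuel acc hf
    cases fuel with
    | zero => simp at hf
    | succ f =>
      simp only [PySem.Chars.count.go]
      by_cases hc : h = c
      · subst hc
        simp only [List.isPrefixOf, BEq.rfl, Bool.true_and, if_true, List.length_nil,
          List.length_cons, List.drop_succ_cons, List.drop_zero]
        rw [ih f (acc+1) (by simpa using hf), List.count_cons]
        simp; omega
      · simp [List.isPrefixOf, hc, ih f acc (by simpa using hf), Ne.symm hc]

theorem count_single (l : List Char) (c : Char) : PySem.Chars.count l [c] = l.count c := by
  simp [PySem.Chars.count, countGo_single c l l.length 0 le_rfl]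

-- Splitting on a single character yields (count of that character) + 1 pieces.
theorem splitGo_len (c : Char) : ∀ (l : List Char) (fuel : Nat) (cur : List Char) (acc : List (List Char)),
    l.length < fuel →
    (PySem.Chars.splitOn.go [c] fuel l cur acc).length = acc.length + 1 + l.count c := by
  intro l
  induction l with
  | nil =>
    intro fuel cur acc hf
    cases fuel with
    | zero => omega
    | succ f => simp [PySem.Chars.splitOn.go]
  | cons h t ih =>
    intro fuel cur acc hf
    cases fuel with
    | zero => omega
    | succ f =>
      simp only [PySem.Chars.splitOn.go]
      by_cases hc : h = c
      · subst hc
        simp only [List.isPrefixOf, BEq.rfl, Bool.true_and, if_true, List.length_nil,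
          List.length_cons, List.drop_succ_cons, List.drop_zero]
        rw [ih f [] (cur.reverse :: acc) (by simp at hf ⊢; omega), List.count_cons]
        simp; omega
      · rw [if_neg (by simp [List.isPrefixOf, Ne.symm hc])]
        rw [ih f (h :: cur) acc (by simp at hf ⊢; omega), List.count_cons]
        simp [hc]

-- The pieces of a split on c ≠ d together contain every d of the whole string.
theorem splitGo_sum (c d : Char) (hcd : c ≠ d) :
    ∀ (l : List Char) (fuel : Nat) (cur : List Char) (acc : List (List Char)),
    l.length < fuel →
    ((PySem.Chars.splitOn.go [c] fuel l cur acc).map (fun t => t.count d)).sum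
      = (acc.map (fun t => t.count d)).sum + cur.count d + l.count d := by
  intro l
  induction l with
  | nil =>
    intro fuel cur acc hf
    cases fuel with
    | zero => omega
    | succ f => simp [PySem.Chars.splitOn.go]
  | cons h t ih =>
    intro fuel cur acc hf
    cases fuel with
    | zero => omega
    | succ f =>
      simp only [PySem.Chars.splitOn.go]
      by_cases hc : h = c
      · subst hc
        simp only [List.isPrefixOf, BEq.rfl, Bool.true_and, if_true, List.length_nil,
          List.length_cons, List.drop_succ_cons, List.drop_zero]
        rw [ih f [] (cur.reverse :: acc) (by simp at hf ⊢; omega)]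
        simp [hcd, List.count_reverse]
        omega
      · rw [if_neg (by simp [List.isPrefixOf, Ne.symm hc])]
        rw [ih f (h :: cur) acc (by simp at hf ⊢; omega)]
        by_cases hd : h = d <;> simp [hd] <;> omega

theorem splitOn_len (l : List Char) (c : Char) :
    (PySem.Chars.splitOn l [c]).length = l.count c + 1 := by
  rw [PySem.Chars.splitOn, splitGo_len c l (l.length+1) [] [] (by omega)]
  simp; omega

theorem splitOn_sum (l : List Char) (c d : Char) (hcd : c ≠ d) :
    ((PySem.Chars.splitOn l [c]).map (fun t => t.count d)).sum = l.count d := by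
  rw [PySem.Chars.splitOn, splitGo_sum c d hcd l (l.length+1) [] [] (by omega)]
  simp

set_option maxHeartbeats 1000000 in
theorem main_eq (expression : String) :
    estimate_transistors expression = estimate_transistors_alt expression := by
  unfold estimate_transistors estimate_transistors_alt
  -- the list Source B's state machine effectively runs over = A's space-stripped string
  have he : (PySem.Str.replace expression " " "").toList
      = expression.toList.filter (fun c => !(c == ' ')) := by
    simp only [PySem.Str.toList_replace, show (" " : String).toList = [' '] from rfl,
      show ("" : String).toList = [] from rfl]
    exact replace_space _
  set l := expression.toList.filter (fun c => !(c == ' ')) with hldef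
  have hsp : ' ' ∉ l := by
    intro h
    have := List.of_mem_filter h
    simp at this
  -- B side: evaluate the fold components
  rw [foldl_bstep_filter]
  set r := l.foldl bstep ⟨0, 0, false, false, false, false, none⟩ with hr
  have hbars : r.bars = (l.count '|' : Int) := by rw [hr, foldl_bars]; simp
  have hamps : r.amps = (l.count '&' : Int) := by rw [hr, foldl_amps]; simp
  have hflag : ∀ (f : BState → Bool) (v : Char),
      (∀ s c, c ≠ ' ' → f (bstep s c) = (f s || (decide (s.prev = some '~') && decide (c = v)))) →
      f ⟨0, 0, false, false, false, false, none⟩ = false →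
      (f r = true ↔ ['~', v] <:+: l) := by
    intro f v hstep h0
    rw [hr, foldl_flag f v hstep l _ hsp, h0]
    simp
  have hA := hflag (·.invA) 'A' bstep_invA rfl
  have hB := hflag (·.invB) 'B' bstep_invB rfl
  have hC := hflag (·.invC) 'C' bstep_invC rfl
  have hD := hflag (·.invD) 'D' bstep_invD rfl
  -- A side: counts via split lemmas, finds via infix
  have hsplit : PySem.Str.split? (PySem.Str.replace expression " " "") "|" =
      some ((PySem.Chars.splitOn l ['|']).map String.ofList) := by
    simp [PySem.Str.split?, PySem.Chars.split?, show "|".toList = ['|'] from rfl, he]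
  have hlen : ((PySem.Chars.splitOn l ['|']).map String.ofList).length
      = l.count '|' + 1 := by
    simp [splitOn_len]
  have hfold : (((PySem.Chars.splitOn l ['|']).map String.ofList).foldl
        (fun acc term => acc + ((PySem.Str.count term "&" : Int) + 1)) 0)
      = (l.count '&' : Int) + ((l.count '|' : Int) + 1) := by
    rw [PySem.List.foldl_add _ (fun term => ((PySem.Str.count term "&" : Int) + 1)) 0]
    rw [List.map_map]
    have : ((PySem.Chars.splitOn l ['|']).map
        ((fun term => ((PySem.Str.count term "&" : Int) + 1)) ∘ String.ofList))
        = (PySem.Chars.splitOn l ['|']).map (fun cs => ((cs.count '&' : Nat) : Int) + 1) := by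
      apply List.map_congr_left
      intro cs _
      simp [Function.comp, count_single, show "&".toList = ['&'] from rfl]
    rw [this, PySem.List.sum_map_add_int]
    rw [PySem.List.sum_map_const_int]
    have hnat := splitOn_sum l '|' '&' (by decide)
    have hcast : (List.map (fun cs => ((List.count '&' cs : Nat) : Int)) (PySem.Chars.splitOn l ['|'])).sum
        = ((List.count '&' l : Nat) : Int) := by
      rw [show (fun cs => ((List.count '&' cs : Nat) : Int))
            = (fun n : Nat => (n : Int)) ∘ (fun cs : List Char => List.count '&' cs) from rfl,
          ← List.map_map, ← Nat.cast_list_sum, hnat]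
    rw [hcast, splitOn_len]
    push_cast
    ring
  have hfind : ∀ (sub : String) (v : Char), sub.toList = ['~', v] →
      ((0 ≤ PySem.Str.find (PySem.Str.replace expression " " "") sub) ↔ ['~', v] <:+: l) := by
    intro sub v hsub
    rw [PySem.Str.find_nonneg_iff, hsub, he]
  have hA' : r.invA = decide (['~', 'A'] <:+: l) := by rw [Bool.eq_iff_iff]; simp [hA]
  have hB' : r.invB = decide (['~', 'B'] <:+: l) := by rw [Bool.eq_iff_iff]; simp [hB]
  have hC' : r.invC = decide (['~', 'C'] <:+: l) := by rw [Bool.eq_iff_iff]; simp [hC]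
  have hD' : r.invD = decide (['~', 'D'] <:+: l) := by rw [Bool.eq_iff_iff]; simp [hD]
  simp only [hsplit, Option.getD_some, hlen, hfold, hbars, hamps, hA', hB', hC', hD',
    hfind "~A" 'A' rfl, hfind "~B" 'B' rfl, hfind "~C" 'C' rfl, hfind "~D" 'D' rfl]
  -- finish by case analysis on the four inverter tests
  by_cases h1 : ['~', 'A'] <:+: l <;> by_cases h2 : ['~', 'B'] <:+: l <;>
    by_cases h3 : ['~', 'C'] <:+: l <;> by_cases h4 : ['~', 'D'] <:+: l <;>
    simp [h1, h2, h3, h4]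

-- ===== VERDICT (by name: the statement is the Claim_ definition above) =====
theorem estimate_transistors_spec : Claim_equal_estimate_transistors := by
  intro expression _
  unfold Spec_estimate_transistors
  exact main_eq expression
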